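-- pv_equiv track=rewrite | github.com/lderoeck/brick_sequencer | brick_sequencer/NilsSequencer.py | find_4white
-- ===== SOURCE A (Python) =====
-- def find_4white(sequence, start_index, width = 8):
--     # 1) begin zoeken van de eerstvolgende witte basen
--     start = start_index
--     while start < len(sequence) - width:
--         if sequence[start:start + width].count(6) == width:
--             break
--         start += 1
--
--     # 2) einde zoeken van de eerstvolgende witte basen
--     end = start
--     while end < len(sequence) - width:
--         if sequence[end:end + width].count(6) <= width/2:
--             break
--         end += 1
--
--     return start, end
-- ===== SOURCE B (Python) =====
-- def find_4white(sequence, start_index, width=8):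
--     # Window counts come from a lazily extended prefix-sum array of
--     # 6-indicators instead of recounting a width-long slice per position.
--     n = len(sequence)
--     pref = [0]
--
--     def ensure(m):
--         while len(pref) <= m:
--             k = len(pref)
--             pref.append(pref[-1] + (sequence[k - 1] == 6))
--
--     def norm(i):
--         if i < 0:
--             i += n
--         return min(max(i, 0), n)
--
--     def cnt(a, b):
--         lo, hi = norm(a), norm(b)
--         if lo >= hi:
--             return 0
--         ensure(hi)
--         return pref[hi] - pref[lo]
--
--     limit = n - width
--     start = start_index
--     while start < limit and cnt(start, start + width) != width:
--         start += 1
--     end = start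
--     while end < limit and 2 * cnt(end, end + width) > width:
--         end += 1
--     return start, end
-- ===== Notes on version B (the rewrite author's own statement) =====
-- stated objective: alternative
-- what changed: Window counts come from a lazily extended prefix-sum array of 6-indicators queried per position, instead of recounting a width-long slice at every position.
import Mathlib
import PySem

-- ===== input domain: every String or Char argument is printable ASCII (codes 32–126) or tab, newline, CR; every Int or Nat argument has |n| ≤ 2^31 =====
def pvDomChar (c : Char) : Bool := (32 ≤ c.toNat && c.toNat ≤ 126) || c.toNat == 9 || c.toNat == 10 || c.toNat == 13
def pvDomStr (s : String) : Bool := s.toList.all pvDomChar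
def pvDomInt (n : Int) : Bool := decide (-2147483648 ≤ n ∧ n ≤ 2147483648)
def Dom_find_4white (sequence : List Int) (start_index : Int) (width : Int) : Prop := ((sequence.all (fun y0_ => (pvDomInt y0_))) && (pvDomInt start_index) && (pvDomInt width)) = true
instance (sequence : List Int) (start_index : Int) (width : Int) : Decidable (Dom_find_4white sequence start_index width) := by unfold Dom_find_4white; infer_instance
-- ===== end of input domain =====

-- B replaces A's per-position slice recount by a lazily extended prefix-sum array of
-- 6-indicators, queried per window position (a different algorithm, not claimed faster).
-- A's 'count(6) <= width/2' compares an int with the float width/2; on the domain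
-- (|width| ≤ 2^31) this comparison is exact and is ported as 2*count ≤ width.

-- ===== PORT A =====
def findStartA (sequence : List Int) (width limit start : Int) : Int :=
  if start < limit then
    if ((PySem.List.slice sequence (some start) (some (start + width))).count 6 : Int) = width then
      start
    else
      findStartA sequence width limit (start + 1)
  else start
termination_by (limit - start).toNat
decreasing_by omega

def findEndA (sequence : List Int) (width limit e : Int) : Int :=
  if e < limit then
    if 2 * ((PySem.List.slice sequence (some e) (some (e + width))).count 6 : Int) ≤ width then
      e
    else
      findEndA sequence width limit (e + 1)
  else e
termination_by (limit - e).toNat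
decreasing_by omega

def find_4white (sequence : List Int) (start_index : Int) (width : Int) : List Int :=
  let start := findStartA sequence width ((sequence.length : Int) - width) start_index
  let e := findEndA sequence width ((sequence.length : Int) - width) start
  [start, e]

-- ===== PORT B =====
-- the accesses pref[-1] and sequence[k-1] are always in range when 'ensure' is called
-- (1 ≤ len(pref) ≤ m ≤ n); getD makes the same computation total.
def ensureB (sequence : List Int) (m : Nat) (pref : List Int) : List Int :=
  if pref.length ≤ m then
    ensureB sequence m
      (pref ++ [pref.getD (pref.length - 1) 0 +
                (if sequence.getD (pref.length - 1) 0 = 6 then 1 else 0)])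
  else pref
termination_by m + 1 - pref.length
decreasing_by simp; omega

def normB (n : Nat) (i : Int) : Int :=
  let j := if i < 0 then i + n else i
  min (max j 0) n

def cntB (sequence pref : List Int) (a b : Int) : List Int × Int :=
  let n := sequence.length
  let lo := normB n a
  let hi := normB n b
  if hi ≤ lo then (pref, 0)
  else
    let pref2 := ensureB sequence hi.toNat pref
    (pref2, pref2.getD hi.toNat 0 - pref2.getD lo.toNat 0)

def findStartB (sequence : List Int) (width limit : Int) (pref : List Int) (start : Int) :
    List Int × Int :=
  if start < limit then
    let r := cntB sequence pref start (start + width)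
    if r.2 = width then (r.1, start)
    else findStartB sequence width limit r.1 (start + 1)
  else (pref, start)
termination_by (limit - start).toNat
decreasing_by omega

def findEndB (sequence : List Int) (width limit : Int) (pref : List Int) (e : Int) :
    List Int × Int :=
  if e < limit then
    let r := cntB sequence pref e (e + width)
    if width < 2 * r.2 then findEndB sequence width limit r.1 (e + 1)
    else (r.1, e)
  else (pref, e)
termination_by (limit - e).toNat
decreasing_by omega

def find_4white_alt (sequence : List Int) (start_index : Int) (width : Int) : List Int :=
  let limit := (sequence.length : Int) - width
  let r1 := findStartB sequence width limit [0] start_index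
  let r2 := findEndB sequence width limit r1.1 r1.2
  [r1.2, r2.2]

-- ===== PRECONDITION & SPEC =====
def Spec_find_4white (sequence : List Int) (start_index : Int) (width : Int) (out : List Int) : Prop := out = find_4white_alt sequence start_index width
instance (sequence : List Int) (start_index : Int) (width : Int) (out : List Int) : Decidable (Spec_find_4white sequence start_index width out) := by unfold Spec_find_4white; infer_instance

-- ===== CLAIM (what is proved, stated in full; the proofs are below) =====
def Claim_equal_find_4white : Prop := ∀ (sequence : List Int) (start_index : Int) (width : Int), Dom_find_4white sequence start_index width → Spec_find_4white sequence start_index width (find_4white sequence start_index width)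

-- ===== LEMMAS AND PROOFS =====

/-- The fully materialised prefix-sum array: entry i is the number of 6s in the
first i elements. `pref` in B is always a prefix of this list. -/
def fullP (xs : List Int) : List Int :=
  (List.range (xs.length + 1)).map (fun i => ((xs.take i).count 6 : Int))

def InvP (xs pref : List Int) : Prop :=
  ∃ k, 1 ≤ k ∧ k ≤ xs.length + 1 ∧ pref = (fullP xs).take k

theorem fullP_length (xs : List Int) : (fullP xs).length = xs.length + 1 := by
  simp [fullP]

theorem fullP_take_getD (xs : List Int) (k i : Nat) (hik : i < k) (hi : i ≤ xs.length) :
    ((fullP xs).take k).getD i 0 = ((xs.take i).count 6 : Int) := by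
  rw [List.getD_eq_getElem?_getD, List.getElem?_take_of_lt hik]
  simp only [fullP, List.getElem?_map, List.getElem?_range (by omega : i < xs.length + 1)]
  rfl

theorem count_take_succ (xs : List Int) (i : Nat) (hi : i < xs.length) :
    ((xs.take (i + 1)).count 6 : Int)
      = ((xs.take i).count 6 : Int) + (if xs.getD i 0 = 6 then 1 else 0) := by
  have h1 : xs.take (i + 1) = xs.take i ++ [xs[i]] := by
    rw [List.take_add_one, List.getElem?_eq_getElem hi]
    rfl
  rw [h1, List.count_append, List.getD_eq_getElem?_getD, List.getElem?_eq_getElem hi]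
  by_cases h : xs[i] = 6 <;> simp [h]

theorem fullP_take_succ (xs : List Int) (k : Nat) (hk : k ≤ xs.length) :
    (fullP xs).take (k + 1)
      = (fullP xs).take k ++ [((xs.take k).count 6 : Int)] := by
  rw [List.take_add_one]
  have hk' : k < (fullP xs).length := by rw [fullP_length]; omega
  rw [List.getElem?_eq_getElem hk']
  simp only [fullP, List.getElem_map, List.getElem_range]
  rfl

theorem ensure_spec (xs : List Int) (m : Nat) (hm : m ≤ xs.length) :
    ∀ j k, j = m + 1 - k → 1 ≤ k → k ≤ xs.length + 1 →
      ensureB xs m ((fullP xs).take k) = (fullP xs).take (max k (m + 1)) := by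
  intro j
  induction j with
  | zero =>
      intro k hj hk1 hk2
      have hlen : ((fullP xs).take k).length = k := by
        rw [List.length_take, fullP_length]; omega
      rw [ensureB, if_neg (by omega)]
      have : max k (m + 1) = k := by omega
      rw [this]
  | succ j ih =>
      intro k hj hk1 hk2
      have hkm : k ≤ m := by omega
      have hlen : ((fullP xs).take k).length = k := by
        rw [List.length_take, fullP_length]; omega
      rw [ensureB, if_pos (by omega)]
      have hstep :
          (fullP xs).take k ++
            [((fullP xs).take k).getD (((fullP xs).take k).length - 1) 0 +
              (if xs.getD (((fullP xs).take k).length - 1) 0 = 6 then 1 else 0)]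
            = (fullP xs).take (k + 1) := by
        rw [fullP_take_succ xs k (by omega), hlen]
        congr 2
        rw [fullP_take_getD xs k (k - 1) (by omega) (by omega)]
        rw [show k = (k - 1) + 1 from by omega, count_take_succ xs (k - 1) (by omega)]
        simp only [Nat.add_sub_cancel]
      rw [hstep, ih (k + 1) (by omega) (by omega) (by omega)]
      have : max (k + 1) (m + 1) = max k (m + 1) := by omega
      rw [this]

theorem normB_toNat (n : Nat) (i : Int) :
    (normB n i).toNat = PySem.List.clampIdx n i ∧ 0 ≤ normB n i ∧ normB n i ≤ n := by
  simp only [normB, PySem.List.clampIdx]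
  split_ifs <;> simp <;> omega

theorem cnt_spec (xs pref : List Int) (a b : Int) (h : InvP xs pref) :
    (cntB xs pref a b).2 = ((PySem.List.slice xs (some a) (some b)).count 6 : Int) ∧
      InvP xs (cntB xs pref a b).1 := by
  obtain ⟨k, hk1, hk2, rfl⟩ := h
  obtain ⟨ha, ha0, han⟩ := normB_toNat xs.length a
  obtain ⟨hb, hb0, hbn⟩ := normB_toNat xs.length b
  simp only [PySem.List.slice, cntB]
  rw [← ha, ← hb]
  set lo := (normB xs.length a).toNat with hlo
  set hi := (normB xs.length b).toNat with hhi
  by_cases hcmp : normB xs.length b ≤ normB xs.length a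
  · have : hi - lo = 0 := by omega
    rw [if_pos hcmp]
    refine ⟨by simp [this], ⟨k, hk1, hk2, rfl⟩⟩
  · rw [if_neg hcmp]
    have hlt : lo < hi := by omega
    have hhin : hi ≤ xs.length := by omega
    rw [ensure_spec xs hi hhin (hi + 1 - k) k rfl hk1 hk2]
    set K := max k (hi + 1) with hK
    have hKn : K ≤ xs.length + 1 := by omega
    constructor
    · rw [fullP_take_getD xs K hi (by omega) (by omega),
        fullP_take_getD xs K lo (by omega) (by omega),
        show hi = lo + (hi - lo) from by omega, List.take_add]
      simp [List.count_append]
    · exact ⟨K, by omega, hKn, rfl⟩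

theorem findStart_spec (xs : List Int) (width limit start : Int) :
    ∀ pref, InvP xs pref →
      (findStartB xs width limit pref start).2 = findStartA xs width limit start ∧
        InvP xs (findStartB xs width limit pref start).1 := by
  fun_induction findStartA xs width limit start with
  | case1 start h hc =>
      intro pref hInv
      obtain ⟨hv, hInv'⟩ := cnt_spec xs pref start (start + width) hInv
      rw [findStartB, if_pos h, if_pos (hv.trans hc)]
      exact ⟨rfl, hInv'⟩
  | case2 start h hc ih =>
      intro pref hInv
      obtain ⟨hv, hInv'⟩ := cnt_spec xs pref start (start + width) hInv
      rw [findStartB, if_pos h, if_neg (by rw [hv]; exact hc)]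
      exact ih _ hInv'
  | case3 start h =>
      intro pref hInv
      rw [findStartB, if_neg h]
      exact ⟨rfl, hInv⟩

theorem findEnd_spec (xs : List Int) (width limit e : Int) :
    ∀ pref, InvP xs pref →
      (findEndB xs width limit pref e).2 = findEndA xs width limit e ∧
        InvP xs (findEndB xs width limit pref e).1 := by
  fun_induction findEndA xs width limit e with
  | case1 e h hc =>
      intro pref hInv
      obtain ⟨hv, hInv'⟩ := cnt_spec xs pref e (e + width) hInv
      rw [findEndB, if_pos h, if_neg (by rw [hv]; omega)]
      exact ⟨rfl, hInv'⟩
  | case2 e h hc ih =>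
      intro pref hInv
      obtain ⟨hv, hInv'⟩ := cnt_spec xs pref e (e + width) hInv
      rw [findEndB, if_pos h, if_pos (by rw [hv]; omega)]
      exact ih _ hInv'
  | case3 e h =>
      intro pref hInv
      rw [findEndB, if_neg h]
      exact ⟨rfl, hInv⟩

theorem InvP_init (xs : List Int) : InvP xs [0] := by
  refine ⟨1, le_refl 1, by omega, ?_⟩
  simp [fullP, List.range_succ_eq_map]

-- ===== VERDICT (by name: the statement is the Claim_ definition above) =====
theorem find_4white_spec : Claim_equal_find_4white := by
  intro sequence start_index width _
  show _ = _
  simp only [find_4white, find_4white_alt]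
  obtain ⟨h1, hInv1⟩ :=
    findStart_spec sequence width ((sequence.length : Int) - width) start_index [0]
      (InvP_init sequence)
  obtain ⟨h2, _⟩ :=
    findEnd_spec sequence width ((sequence.length : Int) - width)
      (findStartB sequence width ((sequence.length : Int) - width) [0] start_index).2
      (findStartB sequence width ((sequence.length : Int) - width) [0] start_index).1 hInv1
  rw [h2, h1]
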